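-- pv_equiv track=rewrite | github.com/Ryles1/AdventofCode | 2015/day8_2015.py | part1
-- ===== SOURCE A (Python) =====
-- def count_code_characters(s):
--     length = 0
--     i = 0
--     s = s.strip().strip('"')
--     while i < len(s):
--         window = s[i: i + 2]
--         if window == r'\"':
--             length += 1
--             i += 2
--         elif window == r'\x':
--             length += 1
--             i += 4
--         elif window == r'\\':
--             length += 1
--             i += 2
--         else:
--             length += 1
--             i += 1
--     return length
--
-- def part1(lines):
--     code_total_length = 0
--     string_total_length = 0
--     for line in lines:
--         code_total_length += len(line.strip())
--         string_total_length += count_code_characters(line)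
--     answer = code_total_length - string_total_length
--     return answer
-- ===== SOURCE B (Python) =====
-- import re
--
-- _TOKEN = re.compile(r'\\"|\\x.{0,2}|\\\\|.', re.DOTALL)
--
-- def part1(lines):
--     return sum(len(line.strip()) - len(_TOKEN.findall(line.strip().strip('"')))
--                for line in lines)
-- ===== Notes on version B (the rewrite author's own statement) =====
-- stated objective: idiomatic
-- what changed: Replaced the hand-rolled while-loop index scanner (window slicing and manual i += 1/2/4 pointer arithmetic) with regex tokenization: one compiled alternation whose matches are exactly the decoded characters, and the two running totals with a single per-line sum of savings.
import Mathlib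
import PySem

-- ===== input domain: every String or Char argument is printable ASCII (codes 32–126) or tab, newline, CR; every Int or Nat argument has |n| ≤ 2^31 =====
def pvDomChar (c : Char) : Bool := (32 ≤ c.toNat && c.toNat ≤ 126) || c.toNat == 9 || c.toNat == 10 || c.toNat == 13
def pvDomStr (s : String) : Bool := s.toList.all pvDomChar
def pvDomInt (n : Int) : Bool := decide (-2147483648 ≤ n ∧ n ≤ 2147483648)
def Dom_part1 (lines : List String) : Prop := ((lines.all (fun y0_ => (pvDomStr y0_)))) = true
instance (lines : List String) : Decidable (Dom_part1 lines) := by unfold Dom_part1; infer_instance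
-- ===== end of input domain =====

-- B replaces A's while-loop index scanner (manual i += 1/2/4 pointer arithmetic over
-- window slices, two running totals) by regex tokenization, one token per decoded
-- character, summed per line.  Same linear cost; more idiomatic.

-- ===== PORT A =====
-- the while loop of count_code_characters: state (length, i), window = s[i : i + 2]
def cccLoop (cs : List Char) (length : Int) (i : Nat) : Int :=
  if _h : i < cs.length then
    let window := PySem.List.slice cs (some (i : Int)) (some ((i : Int) + 2))
    if window = ['\\', '"'] then cccLoop cs (length + 1) (i + 2)
    else if window = ['\\', 'x'] then cccLoop cs (length + 1) (i + 4)
    else if window = ['\\', '\\'] then cccLoop cs (length + 1) (i + 2)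
    else cccLoop cs (length + 1) (i + 1)
  else length
termination_by cs.length - i
decreasing_by all_goals omega

def count_code_characters (s : String) : Int :=
  cccLoop (PySem.Str.stripChars (PySem.Str.strip s) "\"").toList 0 0

def part1 (lines : List String) : Int :=
  let p := lines.foldl
    (fun (acc : Int × Int) line =>
      (acc.1 + (PySem.Str.len (PySem.Str.strip line) : Int),
       acc.2 + count_code_characters line))
    (0, 0)
  p.1 - p.2

-- ===== PORT B =====
-- hand port of Source B's compiled regex  \"|\x.{0,2}|\\|.  under re.DOTALL:
-- len(findall) = number of tokens; at each position the alternatives are tried in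
-- order (the if-chain below), each consuming its span ( \x.{0,2} greedily eats up
-- to two more characters); exact for this pattern, which is anchored token by token.
def tokCount : List Char → Int
  | [] => 0
  | [_] => 1                                    -- a last lone character: token `.` (or `\\`'s first half matched by `.`)
  | c :: d :: r =>
    if c = '\\' then
      if d = '"' then 1 + tokCount r            -- \"
      else if d = 'x' then 1 + tokCount (r.drop 2)   -- \x.{0,2}, greedy
      else if d = '\\' then 1 + tokCount r      -- \\
      else 1 + tokCount (d :: r)                -- .
    else 1 + tokCount (d :: r)                  -- .
termination_by cs => cs.length
decreasing_by all_goals (simp [List.length_drop]; try omega)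

def part1_alt (lines : List String) : Int :=
  (lines.map (fun line =>
      (PySem.Str.len (PySem.Str.strip line) : Int) -
        tokCount (PySem.Str.stripChars (PySem.Str.strip line) "\"").toList)).sum

-- ===== PRECONDITION & SPEC =====
def Spec_part1 (lines : List String) (out : Int) : Prop := out = part1_alt lines
instance (lines : List String) (out : Int) : Decidable (Spec_part1 lines out) := by unfold Spec_part1; infer_instance

-- ===== CLAIM (what is proved, stated in full; the proofs are below) =====
def Claim_equal_part1 : Prop := ∀ (lines : List String), Dom_part1 lines → Spec_part1 lines (part1 lines)

-- ===== LEMMAS AND PROOFS =====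

-- A's index scanner, started at i, counts exactly the tokens of the rest of the string.
lemma loop_eq (cs : List Char) : ∀ n i length, cs.length - i ≤ n →
    cccLoop cs length i = length + tokCount (cs.drop i) := by
  intro n
  induction n with
  | zero =>
    intro i length h
    rw [cccLoop]
    have hge : ¬ i < cs.length := by omega
    simp [hge, List.drop_eq_nil_of_le (by omega : cs.length ≤ i), tokCount]
  | succ n ih =>
    intro i length h
    rw [cccLoop]
    by_cases hi : i < cs.length
    · have hwin : PySem.List.slice cs (some (i : Int)) (some ((i : Int) + 2))
          = (cs.drop i).take 2 := by
        have := PySem.List.slice_natCast_add (xs := cs) (j := i) (n := 2)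
        simpa using this
      simp only [hi, dif_pos, hwin]
      have hdk : ∀ k, cs.drop (i + k) = (cs.drop i).drop k := by
        intro k; rw [List.drop_drop]
      cases ht : cs.drop i with
      | nil => exact absurd (List.drop_eq_nil_iff.mp ht) (by omega)
      | cons a t =>
        cases t with
        | nil =>
          have h1 : ¬ ([a].take 2 = ['\\', '"']) := by simp
          have h2 : ¬ ([a].take 2 = ['\\', 'x']) := by simp
          have h3 : ¬ ([a].take 2 = ['\\', '\\']) := by simp
          rw [if_neg h1, if_neg h2, if_neg h3,
            ih (i + 1) (length + 1) (by omega), hdk 1, ht]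
          simp [tokCount]
        | cons b r =>
          by_cases ha : a = '\\'
          · subst ha
            by_cases hb1 : b = '"'
            · subst hb1
              rw [if_pos (by simp), ih (i + 2) (length + 1) (by omega), hdk 2, ht]
              rw [tokCount]; simp; ring
            · by_cases hb2 : b = 'x'
              · subst hb2
                rw [if_neg (by simp), if_pos (by simp),
                  ih (i + 4) (length + 1) (by omega), hdk 4, ht]
                rw [tokCount]; simp; ring
              · by_cases hb3 : b = '\\'
                · subst hb3
                  rw [if_neg (by simp), if_neg (by simp), if_pos (by simp),
                    ih (i + 2) (length + 1) (by omega), hdk 2, ht]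
                  rw [tokCount]; simp; ring
                · rw [if_neg (by simp [hb1]), if_neg (by simp [hb2]),
                    if_neg (by simp [hb3]),
                    ih (i + 1) (length + 1) (by omega), hdk 1, ht]
                  rw [tokCount]; simp [hb1, hb2, hb3]; ring
          · rw [if_neg (by simp [ha]), if_neg (by simp [ha]), if_neg (by simp [ha]),
              ih (i + 1) (length + 1) (by omega), hdk 1, ht]
            rw [tokCount]; simp [ha]; ring
    · have := List.drop_eq_nil_of_le (by omega : cs.length ≤ i)
      simp [hi, this, tokCount]

-- A's pair-accumulator fold, subtracted, is B's sum of per-line savings.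
lemma fold_pair (lines : List String) : ∀ c s : Int,
    ((lines.foldl
      (fun (acc : Int × Int) line =>
        (acc.1 + (PySem.Str.len (PySem.Str.strip line) : Int),
         acc.2 + count_code_characters line)) (c, s)).1 -
     (lines.foldl
      (fun (acc : Int × Int) line =>
        (acc.1 + (PySem.Str.len (PySem.Str.strip line) : Int),
         acc.2 + count_code_characters line)) (c, s)).2)
    = (c - s) + (lines.map (fun line =>
        (PySem.Str.len (PySem.Str.strip line) : Int) -
          tokCount (PySem.Str.stripChars (PySem.Str.strip line) "\"").toList)).sum := by
  induction lines with
  | nil => simp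
  | cons l ls ih =>
    intro c s
    simp only [List.foldl_cons, List.map_cons, List.sum_cons]
    rw [ih]
    have : count_code_characters l
        = tokCount (PySem.Str.stripChars (PySem.Str.strip l) "\"").toList := by
      rw [count_code_characters,
        loop_eq _ (PySem.Str.stripChars (PySem.Str.strip l) "\"").toList.length 0 0 (by omega)]
      simp
    rw [this]; ring

-- ===== VERDICT (by name: the statement is the Claim_ definition above) =====
theorem part1_spec : Claim_equal_part1 := by
  intro lines _
  unfold Spec_part1 part1 part1_alt
  simpa using fold_pair lines 0 0
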